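-- pv_equiv track=rewrite | github.com/mdth/Masterarbeit | parsing.py | get_textsnippets
-- ===== SOURCE A (Python) =====
-- def get_textsnippets(indl, indr, size, textlength, tokens):
--     if (indl - size < 0) and (indr + size > textlength):
--         left_index = size - 1
--         while not (indl - left_index) == 0:
--             left_index -= 1
--         right_index = size - 1
--         while not (indr + right_index) == textlength:
--             right_index -= 1
--         return " ".join(tokens[indl - left_index:indr + right_index])
--
--     elif indr + size > textlength:
--         right_index = size - 1
--         while not (indr + right_index) == textlength:
--             right_index -= 1
--         return " ".join(tokens[indl - size:indr + right_index])
--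
--     elif indl - size < 0:
--         left_index = size - 1
--         while not (indl - left_index) == 0:
--             left_index -= 1
--         return " ".join(tokens[indl - left_index:indr + size + 1])
--     else:
--         return " ".join(tokens[indl - size:indr + (size + 1)])
-- ===== SOURCE B (Python) =====
-- def get_textsnippets(indl, indr, size, textlength, tokens):
--     start = max(indl - size, 0)
--     end = textlength if indr + size > textlength else indr + size + 1
--     return " ".join(tokens[start:end])
-- ===== Notes on version B (the rewrite author's own statement) =====
-- stated objective: simpler
-- what changed: Replaces A's 4-way branch dispatch with two linear-search countdown loops by a single closed-form computation of the slice bounds (start = max(indl-size,0), end = textlength or indr+size+1) and one slice.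
import Mathlib
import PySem

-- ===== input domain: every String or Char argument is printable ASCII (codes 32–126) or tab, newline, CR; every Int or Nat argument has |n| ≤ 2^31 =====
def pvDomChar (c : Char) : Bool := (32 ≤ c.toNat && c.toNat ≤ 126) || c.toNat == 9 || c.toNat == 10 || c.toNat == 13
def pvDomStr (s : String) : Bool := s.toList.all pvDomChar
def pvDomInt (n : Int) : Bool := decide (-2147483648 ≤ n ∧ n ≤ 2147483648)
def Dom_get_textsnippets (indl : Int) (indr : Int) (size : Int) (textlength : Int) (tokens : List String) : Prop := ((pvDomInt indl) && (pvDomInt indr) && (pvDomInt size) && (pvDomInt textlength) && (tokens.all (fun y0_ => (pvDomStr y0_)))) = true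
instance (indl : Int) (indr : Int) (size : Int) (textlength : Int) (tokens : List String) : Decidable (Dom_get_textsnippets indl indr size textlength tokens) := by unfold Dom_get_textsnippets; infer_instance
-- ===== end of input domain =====

-- B changes: the 4-way branch dispatch with countdown-search loops is replaced by a
-- closed-form computation of the two slice bounds and a single slice (objective: simpler).

-- ===== PORT A =====
-- A's 'while not (li == stop): li -= 1' countdown loop, counting li down until it equals stop.
-- The 'li ≤ stop' guard makes the recursion total; in every branch of A the loop starts at
-- li = size - 1 ≥ stop, where the guard fires exactly at li = stop (Python's loop exit).
def pvWhileDown (stop li : Int) : Int :=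
  if h : li ≤ stop then li else pvWhileDown stop (li - 1)
termination_by (li - stop).toNat
decreasing_by omega

def get_textsnippets (indl : Int) (indr : Int) (size : Int) (textlength : Int) (tokens : List String) : String :=
  if indl - size < 0 ∧ indr + size > textlength then
    -- left_index counts down until indl - left_index == 0, i.e. until left_index = indl
    let left_index := pvWhileDown indl (size - 1)
    -- right_index counts down until indr + right_index == textlength, i.e. until right_index = textlength - indr
    let right_index := pvWhileDown (textlength - indr) (size - 1)
    PySem.Str.join " " (PySem.List.slice tokens (some (indl - left_index)) (some (indr + right_index)))
  else if indr + size > textlength then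
    let right_index := pvWhileDown (textlength - indr) (size - 1)
    PySem.Str.join " " (PySem.List.slice tokens (some (indl - size)) (some (indr + right_index)))
  else if indl - size < 0 then
    let left_index := pvWhileDown indl (size - 1)
    PySem.Str.join " " (PySem.List.slice tokens (some (indl - left_index)) (some (indr + size + 1)))
  else
    PySem.Str.join " " (PySem.List.slice tokens (some (indl - size)) (some (indr + (size + 1))))

-- ===== PORT B =====
def get_textsnippets_alt (indl : Int) (indr : Int) (size : Int) (textlength : Int) (tokens : List String) : String :=
  let start := max (indl - size) 0
  let «end» := if indr + size > textlength then textlength else indr + size + 1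
  PySem.Str.join " " (PySem.List.slice tokens (some start) (some «end»))

-- ===== PRECONDITION & SPEC =====
def Spec_get_textsnippets (indl : Int) (indr : Int) (size : Int) (textlength : Int) (tokens : List String) (out : String) : Prop := out = get_textsnippets_alt indl indr size textlength tokens
instance (indl : Int) (indr : Int) (size : Int) (textlength : Int) (tokens : List String) (out : String) : Decidable (Spec_get_textsnippets indl indr size textlength tokens out) := by unfold Spec_get_textsnippets; infer_instance

-- ===== CLAIM (what is proved, stated in full; the proofs are below) =====
def Claim_equal_get_textsnippets : Prop := ∀ (indl : Int) (indr : Int) (size : Int) (textlength : Int) (tokens : List String), Dom_get_textsnippets indl indr size textlength tokens → Spec_get_textsnippets indl indr size textlength tokens (get_textsnippets indl indr size textlength tokens)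

-- ===== LEMMAS AND PROOFS =====
theorem pvWhileDown_eq (stop li : Int) (h : stop ≤ li) : pvWhileDown stop li = stop := by
  obtain ⟨n, hn⟩ : ∃ n : ℕ, li = stop + n := ⟨(li - stop).toNat, by omega⟩
  subst hn
  induction n with
  | zero => rw [pvWhileDown]; simp
  | succ k ih =>
    rw [pvWhileDown, dif_neg (by push_cast; omega)]
    have e : stop + ((k + 1 : ℕ) : Int) - 1 = stop + (k : Int) := by push_cast; ring
    rw [e]; exact ih (by omega)

-- ===== VERDICT (by name: the statement is the Claim_ definition above) =====
theorem get_textsnippets_spec : Claim_equal_get_textsnippets := by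
  intro indl indr size textlength tokens _
  unfold Spec_get_textsnippets get_textsnippets get_textsnippets_alt
  by_cases hR : indr + size > textlength <;> by_cases hL : indl - size < 0
  · rw [if_pos ⟨hL, hR⟩, if_pos hR]
    simp only [pvWhileDown_eq indl (size - 1) (by omega),
               pvWhileDown_eq (textlength - indr) (size - 1) (by omega)]
    congr 2 <;> exact congrArg some (by omega)
  · rw [if_neg (by tauto), if_pos hR, if_pos hR]
    simp only [pvWhileDown_eq (textlength - indr) (size - 1) (by omega)]
    congr 2 <;> exact congrArg some (by omega)
  · rw [if_neg (by tauto), if_neg hR, if_pos hL, if_neg hR]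
    simp only [pvWhileDown_eq indl (size - 1) (by omega)]
    congr 2 <;> exact congrArg some (by omega)
  · rw [if_neg (by tauto), if_neg hR, if_neg hL, if_neg hR]
    congr 2 <;> exact congrArg some (by omega)
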